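-- pv_equiv track=rewrite | github.com/halton/coco | coco/companion/profile_persist.py | merge_lists_lru
-- ===== SOURCE A (Python) =====
-- from typing import Any, Callable, Dict, List, Mapping, Optional
--
-- def merge_lists_lru(existing: List[str], new: List[str], cap: Optional[int] = None) -> List[str]:
--     """interests/goals/dialog_summary 合并：去重保 LRU；可选 cap 截尾保新。"""
--     out: List[str] = list(existing)
--     for item in new:
--         if not item:
--             continue
--         if item in out:
--             out.remove(item)
--         out.append(item)
--     if cap is not None and cap > 0 and len(out) > cap:
--         out = out[-cap:]
--     return out
-- ===== SOURCE B (Python) =====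
-- def merge_lists_lru(existing, new, cap=None):
--     # One reverse pass with per-value keep budgets instead of repeated list scans/removes:
--     # a value already in `existing` keeps its last count(existing) occurrences of the
--     # merged sequence; a value only in `new` keeps just its last occurrence.
--     budget = {}
--     for x in existing:
--         budget[x] = budget.get(x, 0) + 1
--     kept = []
--     for x in reversed(existing + [i for i in new if i]):
--         b = budget.get(x, 1)
--         if b > 0:
--             kept.append(x)
--             budget[x] = b - 1
--     kept.reverse()
--     if cap is not None and cap > 0 and len(kept) > cap:
--         kept = kept[-cap:]
--     return kept
-- ===== Notes on version B (the rewrite author's own statement) =====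
-- stated objective: faster
-- what changed: Replaces the per-item 'in'/'remove' scans over the growing list by a single reverse pass over existing + filtered new with a dict of per-value keep budgets (count in existing, default 1), then a reverse; O(n+m) instead of O(m*(n+m)).
import Mathlib
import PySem

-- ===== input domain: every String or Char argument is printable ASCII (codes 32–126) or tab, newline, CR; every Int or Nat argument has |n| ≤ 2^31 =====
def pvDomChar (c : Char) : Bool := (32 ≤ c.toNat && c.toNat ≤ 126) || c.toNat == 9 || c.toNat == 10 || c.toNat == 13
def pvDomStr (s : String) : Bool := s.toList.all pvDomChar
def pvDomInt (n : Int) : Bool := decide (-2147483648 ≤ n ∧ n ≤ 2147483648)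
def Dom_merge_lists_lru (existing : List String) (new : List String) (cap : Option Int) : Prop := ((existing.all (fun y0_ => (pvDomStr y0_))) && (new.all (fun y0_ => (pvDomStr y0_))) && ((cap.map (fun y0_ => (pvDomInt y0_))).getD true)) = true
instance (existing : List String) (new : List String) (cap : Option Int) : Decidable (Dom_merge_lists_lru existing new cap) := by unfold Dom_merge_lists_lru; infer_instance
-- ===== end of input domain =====

-- B replaces A's quadratic scan-and-remove LRU merge by one reverse pass with
-- per-value keep budgets (a dict), O(n+m) instead of O(m·(n+m)); return values proved equal.

-- ===== PORT A =====
def merge_lists_lru (existing : List String) (new : List String) (cap : Option Int) : List String :=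
  let out := new.foldl (fun out item =>
    if item = "" then out
    else
      let out1 := if out.contains item then out.erase item else out
      out1 ++ [item]) existing
  match cap with
  | none => out
  | some c => if c > 0 ∧ (out.length : Int) > c then PySem.List.slice out (some (-c)) none else out

-- ===== PORT B =====
def merge_lists_lru_alt (existing : List String) (new : List String) (cap : Option Int) : List String :=
  let budget := existing.foldl (fun d x => d.insert x (d.getD x 0 + 1)) (PySem.Dict.empty)
  let st := ((existing ++ new.filter (fun i => !(i == ""))).reverse).foldl
      (fun (st : List String × PySem.Dict String Int) x =>
        let b := st.2.getD x 1
        if b > 0 then (st.1 ++ [x], st.2.insert x (b - 1)) else st)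
      (([], budget) : List String × PySem.Dict String Int)
  let kept := st.1.reverse
  match cap with
  | none => kept
  | some c => if c > 0 ∧ (kept.length : Int) > c then PySem.List.slice kept (some (-c)) none else kept

-- ===== PRECONDITION & SPEC =====
def Spec_merge_lists_lru (existing : List String) (new : List String) (cap : Option Int) (out : List String) : Prop := out = merge_lists_lru_alt existing new cap
instance (existing : List String) (new : List String) (cap : Option Int) (out : List String) : Decidable (Spec_merge_lists_lru existing new cap out) := by unfold Spec_merge_lists_lru; infer_instance

-- ===== CLAIM (what is proved, stated in full; the proofs are below) =====
def Claim_equal_merge_lists_lru : Prop := ∀ (existing : List String) (new : List String) (cap : Option Int), Dom_merge_lists_lru existing new cap → Spec_merge_lists_lru existing new cap (merge_lists_lru existing new cap)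

-- ===== LEMMAS AND PROOFS =====

-- pure model of B's budgeted reverse pass
def pvUpd (f : String → Int) (x : String) (v : Int) : String → Int :=
  fun y => if y = x then v else f y

def pvPass (f : String → Int) : List String → List String
  | [] => []
  | x :: xs => if f x > 0 then x :: pvPass (pvUpd f x (f x - 1)) xs else pvPass f xs

def pvResid (f : String → Int) : List String → (String → Int)
  | [] => f
  | x :: xs => if f x > 0 then pvResid (pvUpd f x (f x - 1)) xs else pvResid f xs

-- initial budget: count in existing, default 1 for absent values
def pvF0 (acc : List String) (y : String) : Int :=
  if acc.count y = 0 then 1 else (acc.count y : Int)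

theorem pvPass_keepall (l : List String) (f : String → Int)
    (h : ∀ y, (l.count y : Int) ≤ f y) : pvPass f l = l := by
  induction l generalizing f with
  | nil => rfl
  | cons x xs ih =>
    have hx : (0 : Int) < f x := by
      have := h x
      have : ((xs.count x + 1 : Nat) : Int) ≤ f x := by
        simpa [List.count_cons] using h x
      omega
    simp only [pvPass, if_pos hx]
    congr 1
    apply ih
    intro y
    by_cases hy : y = x
    · subst hy
      have : ((xs.count y + 1 : Nat) : Int) ≤ f y := by
        simpa [List.count_cons] using h y
      simp [pvUpd]
      omega
    · have := h y
      simp [pvUpd, hy]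
      have : ((xs.count y : Nat) : Int) ≤ (((x :: xs).count y : Nat) : Int) := by
        simp [List.count_cons]
        split <;> omega
      omega

theorem pvPass_append (s t : List String) (f : String → Int) :
    pvPass f (s ++ t) = pvPass f s ++ pvPass (pvResid f s) t := by
  induction s generalizing f with
  | nil => simp [pvPass, pvResid]
  | cons x xs ih =>
    by_cases hx : (0 : Int) < f x
    · simp [pvPass, pvResid, hx, ih]
    · simp [pvPass, pvResid, hx, ih]

theorem pvResid_le (s : List String) (f : String → Int) (y : String) :
    pvResid f s y ≤ f y := by
  induction s generalizing f with
  | nil => simp [pvResid]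
  | cons x xs ih =>
    by_cases hx : (0 : Int) < f x
    · simp only [pvResid, if_pos hx]
      refine le_trans (ih _) ?_
      by_cases hy : y = x <;> simp [pvUpd, hy] <;> omega
    · simp only [pvResid, if_neg hx]
      exact ih f

theorem pvResid_append (s t : List String) (f : String → Int) :
    pvResid f (s ++ t) = pvResid (pvResid f s) t := by
  induction s generalizing f with
  | nil => simp [pvResid]
  | cons x xs ih =>
    by_cases hx : (0 : Int) < f x <;> simp [pvResid, hx, ih]

-- dropping the last occurrence of i is invisible to a pass whose budget for i
-- is below the number of occurrences
theorem pvPass_drop_last (i : String) (l : List String) (g : String → Int)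
    (h : g i ≤ (l.count i : Int) - 1) :
    pvPass g l = pvPass g ((l.reverse.erase i).reverse) := by
  induction l generalizing g with
  | nil => rfl
  | cons x xs ih =>
    by_cases hm : i ∈ xs
    · have hmr : i ∈ xs.reverse := by simpa using hm
      have herase : ((x :: xs).reverse.erase i).reverse
          = x :: (xs.reverse.erase i).reverse := by
        simp only [List.reverse_cons]
        rw [List.erase_append_left _ hmr]
        simp
      rw [herase]
      have hcnt : (1 : Nat) ≤ xs.count i := List.one_le_count_iff.mpr hm
      by_cases hx : (0 : Int) < g x
      · simp only [pvPass, if_pos hx]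
        congr 1
        apply ih
        by_cases hxi : x = i
        · subst hxi
          have : (x :: xs).count x = xs.count x + 1 := by simp [List.count_cons]
          rw [this] at h; push_cast at h ⊢
          simp [pvUpd]; omega
        · have hix : ¬ i = x := fun hc => hxi hc.symm
          have : (x :: xs).count i = xs.count i := by
            simp [List.count_cons, hxi, hix]
          rw [this] at h
          simpa [pvUpd, hix] using h
      · simp only [pvPass, if_neg hx]
        apply ih
        by_cases hxi : x = i
        · subst hxi
          push_cast; omega
        · have hix : ¬ i = x := fun hc => hxi hc.symm
          have : (x :: xs).count i = xs.count i := by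
            simp [List.count_cons, hxi, hix]
          rw [this] at h; exact h
    · have hmr : i ∉ xs.reverse := by simpa using hm
      by_cases hxi : x = i
      · subst hxi
        have herase : ((x :: xs).reverse.erase x).reverse = xs := by
          simp only [List.reverse_cons]
          rw [List.erase_append_right _ hmr]
          simp
        rw [herase]
        have hc0 : xs.count x = 0 := List.count_eq_zero.mpr hm
        have : (x :: xs).count x = 1 := by simp [List.count_cons, hc0]
        rw [this] at h
        have hx : ¬ (0 : Int) < g x := by push_cast at h; omega
        simp [pvPass, hx]
      · have herase : ((x :: xs).reverse.erase i).reverse = x :: xs := by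
          simp only [List.reverse_cons]
          rw [List.erase_append_right _ hmr]
          have hix : ¬ i = x := fun hc => hxi hc.symm
          simp [List.erase_cons, hix, hxi]
        rw [herase]

-- the budget function is invariant under A's step
theorem pvF0_step (acc : List String) (i : String) :
    pvF0 ((if acc.contains i then acc.erase i else acc) ++ [i]) = pvF0 acc := by
  funext y
  by_cases hm : acc.contains i
  · have hmem : i ∈ acc := by simpa using hm
    have hc : 1 ≤ acc.count i := List.one_le_count_iff.mpr hmem
    simp only [if_pos hm]
    by_cases hy : y = i
    · subst hy
      simp [pvF0, List.count_append, List.count_erase_self]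
      omega
    · simp [pvF0, List.count_append, List.count_erase_of_ne hy, List.count_cons, Ne.symm hy, hy]
  · have hmem : i ∉ acc := by simpa using hm
    have hc : acc.count i = 0 := List.count_eq_zero.mpr hmem
    simp only [if_neg hm]
    by_cases hy : y = i
    · subst hy
      simp [pvF0, List.count_append, hc]
    · simp [pvF0, List.count_append, List.count_cons, Ne.symm hy, hy]

-- core: A's fold equals the reversed budgeted pass over the reversed merged sequence
theorem pvMain (new : List String) (acc : List String) :
    new.foldl (fun out item =>
      if item = "" then out
      else
        let out1 := if out.contains item then out.erase item else out
        out1 ++ [item]) acc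
    = (pvPass (pvF0 acc) ((acc ++ new.filter (fun i => !(i == ""))).reverse)).reverse := by
  induction new generalizing acc with
  | nil =>
    simp only [List.foldl_nil, List.filter_nil, List.append_nil]
    rw [pvPass_keepall]
    · simp
    · intro y
      simp [pvF0, List.count_reverse]
      split <;> omega
  | cons i rest ih =>
    by_cases hi : i = ""
    · subst hi
      simp only [List.foldl_cons, if_pos rfl, List.filter_cons]
      simpa using ih acc
    · have hfi : (!(i == "")) = true := by simp [hi]
      simp only [List.foldl_cons, if_neg hi, List.filter_cons, hfi, if_pos]
      rw [ih ((if acc.contains i then acc.erase i else acc) ++ [i])]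
      rw [pvF0_step]
      have hsplit1 : (((if acc.contains i then acc.erase i else acc) ++ [i])
            ++ rest.filter (fun i => !(i == ""))).reverse
          = ((rest.filter (fun i => !(i == ""))).reverse ++ [i])
            ++ (if acc.contains i then acc.erase i else acc).reverse := by
        simp
      have hsplit2 : (acc ++ i :: rest.filter (fun i => !(i == ""))).reverse
          = ((rest.filter (fun i => !(i == ""))).reverse ++ [i]) ++ acc.reverse := by
        simp
      have hpp : pvPass (pvF0 acc) ((((if acc.contains i then acc.erase i else acc) ++ [i])
            ++ rest.filter (fun i => !(i == ""))).reverse)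
          = pvPass (pvF0 acc) ((acc ++ i :: rest.filter (fun i => !(i == ""))).reverse) := by
        rw [hsplit1, hsplit2]
        by_cases hm : acc.contains i
        · have hmem : i ∈ acc := by simpa using hm
          have hcnt : 1 ≤ acc.count i := List.one_le_count_iff.mpr hmem
          simp only [if_pos hm]
          set s := (rest.filter (fun i => !(i == ""))).reverse ++ [i] with hs
          rw [pvPass_append s ((acc.erase i).reverse) (pvF0 acc),
              pvPass_append s acc.reverse (pvF0 acc)]
          congr 1
          set g := pvResid (pvF0 acc) s with hg
          have hgle : g i ≤ pvF0 acc i - 1 := by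
            rw [hg, hs, pvResid_append]
            set g' := pvResid (pvF0 acc) (rest.filter (fun i => !(i == ""))).reverse with hg'
            have h1 : g' i ≤ pvF0 acc i := pvResid_le _ _ _
            have hf1 : 1 ≤ pvF0 acc i := by
              simp [pvF0]
              split <;> omega
            by_cases hgi : (0 : Int) < g' i
            · simp [pvResid, pvUpd, hgi]; omega
            · simp [pvResid, pvUpd, hgi]; omega
          have hdrop := pvPass_drop_last i acc.reverse g (by
            rw [List.count_reverse]
            have : pvF0 acc i = (acc.count i : Int) := by
              simp [pvF0]
              omega
            omega)
          rw [hdrop]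
          congr 1
          simp
        · have hmem : i ∉ acc := by simpa using hm
          simp [hm, hmem]
      rw [hpp]

-- bridge: the dict-based fold of port B computes the pure pass
theorem pvFoldBridge (l : List String) (k0 : List String)
    (d : PySem.Dict String Int) (f : String → Int)
    (hd : ∀ y, d.getD y 1 = f y) :
    (l.foldl (fun (st : List String × PySem.Dict String Int) x =>
        let b := st.2.getD x 1
        if b > 0 then (st.1 ++ [x], st.2.insert x (b - 1)) else st) (k0, d)).1
    = k0 ++ pvPass f l := by
  induction l generalizing k0 d f with
  | nil => simp [pvPass]
  | cons x xs ih =>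
    simp only [List.foldl_cons]
    rw [hd x]
    by_cases hx : (0 : Int) < f x
    · simp only [if_pos hx]
      rw [ih (k0 ++ [x]) _ (pvUpd f x (f x - 1)) ?_]
      · simp [pvPass, hx]
      · intro y
        rw [PySem.Dict.getD_insert]
        by_cases hy : y = x <;> simp [pvUpd, hy, hd y]
    · simp only [if_neg hx]
      rw [ih k0 d f hd]
      simp [pvPass, hx]

-- bridge: the counter dict with default 1 is pvF0
theorem pvBudgetBridge (existing : List String) (y : String) :
    (existing.foldl (fun d x => d.insert x (d.getD x 0 + 1))
        (PySem.Dict.empty : PySem.Dict String Int)).getD y 1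
      = pvF0 existing y := by
  rw [PySem.Dict.foldl_insert_getD_add_one_eq_counter]
  by_cases hm : y ∈ existing
  · have hcnt : 1 ≤ existing.count y := List.one_le_count_iff.mpr hm
    have h0 : (PySem.Dict.counter existing).getD y 0 = (existing.count y : Int) :=
      PySem.Dict.getD_counter existing y
    have hcont : (PySem.Dict.counter existing).contains y = true := by
      rw [PySem.Dict.contains_counter]
      simpa using hm
    rcases hsome : (PySem.Dict.counter existing).get? y with _ | v
    · exfalso
      rw [PySem.Dict.contains_eq_isSome_get?, hsome] at hcont
      simp at hcont
    · rw [PySem.Dict.getD_eq_get?_getD, hsome]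
      rw [PySem.Dict.getD_eq_get?_getD, hsome] at h0
      simp at h0 ⊢
      simp [pvF0, h0]
      omega
  · have hcont : (PySem.Dict.counter existing).contains y = false := by
      rw [PySem.Dict.contains_counter]
      simpa using hm
    rcases hsome : (PySem.Dict.counter existing).get? y with _ | v
    · rw [PySem.Dict.getD_eq_get?_getD, hsome]
      simp [pvF0, List.count_eq_zero.mpr hm]
    · exfalso
      rw [PySem.Dict.contains_eq_isSome_get?, hsome] at hcont
      simp at hcont

-- ===== VERDICT (by name: the statement is the Claim_ definition above) =====
theorem merge_lists_lru_spec : Claim_equal_merge_lists_lru := by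
  intro existing new cap _
  show merge_lists_lru existing new cap = merge_lists_lru_alt existing new cap
  unfold merge_lists_lru merge_lists_lru_alt
  have hkept :
      new.foldl (fun out item =>
        if item = "" then out
        else
          let out1 := if out.contains item then out.erase item else out
          out1 ++ [item]) existing
      = (((existing ++ new.filter (fun i => !(i == ""))).reverse).foldl
          (fun (st : List String × PySem.Dict String Int) x =>
            let b := st.2.getD x 1
            if b > 0 then (st.1 ++ [x], st.2.insert x (b - 1)) else st)
          ([], existing.foldl (fun d x => d.insert x (d.getD x 0 + 1)) PySem.Dict.empty)).1.reverse := by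
    rw [pvFoldBridge _ [] _ (pvF0 existing) (pvBudgetBridge existing)]
    simpa using pvMain new existing
  rw [hkept]
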